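-- pv_equiv track=rewrite | github.com/junjslee/gaze-vqa-multiview | pipeline/prompts.py | _format_person_desc
-- ===== SOURCE A (Python) =====
-- def lc(s):
--     """Lowercase helper used to normalize prompt text (None -> empty)."""
--     if s is None:
--         return ""
--     return str(s).strip().lower()
--
-- _CLOTHING_NOUNS = {
--     "shirt", "tshirt", "t-shirt", "sweater", "hoodie", "jacket", "coat", "vest",
--     "pants", "jeans", "shorts", "skirt", "dress", "leggings",
--     "shoes", "sneakers", "sandals", "slippers", "boots", "flip-flops",
--     "hat", "cap", "beanie", "glasses", "sunglasses", "scarf", "tie",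
--     "backpack", "bag", "purse", "apron",
-- }
--
-- def _format_person_desc(person_desc):
--     """Normalize a clothing-only description into a short readable phrase."""
--     s = lc(person_desc)
--     if not s:
--         return "person"
--     for prefix in ("a ", "the "):
--         if s.startswith(prefix):
--             s = s[len(prefix):].strip()
--     for prefix in ("person ", "man ", "woman ", "boy ", "girl "):
--         if s.startswith(prefix):
--             s = s[len(prefix):].strip()
--     for prefix in ("wearing ", "with "):
--         if s.startswith(prefix):
--             s = s[len(prefix):].strip()
--     tokens = s.split()
--     last_idx = -1
--     for i, t in enumerate(tokens):
--         if t in _CLOTHING_NOUNS: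
--             last_idx = i
--     if last_idx >= 0:
--         tokens = tokens[:last_idx + 1]
--     groups = []
--     cur = []
--     for t in tokens:
--         cur.append(t)
--         if t in _CLOTHING_NOUNS:
--             groups.append(" ".join(cur))
--             cur = []
--     if cur:
--         if groups:
--             groups[-1] = groups[-1] + " " + " ".join(cur)
--         else:
--             groups.append(" ".join(cur))
--     if len(groups) == 1:
--         return groups[0]
--     if len(groups) == 2:
--         return f"{groups[0]} and {groups[1]}"
--     return ", ".join(groups[:-1]) + f", and {groups[-1]}"
-- ===== SOURCE B (Python) =====
-- def lc(s):
--     """Lowercase helper used to normalize prompt text (None -> empty)."""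
--     if s is None:
--         return ""
--     return str(s).strip().lower()
--
-- _CLOTHING_NOUNS = {
--     "shirt", "tshirt", "t-shirt", "sweater", "hoodie", "jacket", "coat", "vest",
--     "pants", "jeans", "shorts", "skirt", "dress", "leggings",
--     "shoes", "sneakers", "sandals", "slippers", "boots", "flip-flops",
--     "hat", "cap", "beanie", "glasses", "sunglasses", "scarf", "tie",
--     "backpack", "bag", "purse", "apron",
-- }
--
-- def _group_at_nouns(tokens):
--     """Recursively split off the leading segment ending at the FIRST clothing
--     noun; tokens containing no noun contribute nothing (they are dropped)."""
--     for i, t in enumerate(tokens):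
--         if t in _CLOTHING_NOUNS:
--             return [" ".join(tokens[:i + 1])] + _group_at_nouns(tokens[i + 1:])
--     return []
--
-- def _format_person_desc(person_desc):
--     """Normalize a clothing-only description into a short readable phrase."""
--     s = lc(person_desc)
--     if not s:
--         return "person"
--     for prefix in ("a ", "the "):
--         if s.startswith(prefix):
--             s = s[len(prefix):].strip()
--     for prefix in ("person ", "man ", "woman ", "boy ", "girl "):
--         if s.startswith(prefix):
--             s = s[len(prefix):].strip()
--     for prefix in ("wearing ", "with "):
--         if s.startswith(prefix):
--             s = s[len(prefix):].strip()
--     tokens = s.split()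
--     groups = _group_at_nouns(tokens) or [" ".join(tokens)]
--     if len(groups) == 1:
--         return groups[0]
--     sep = " and " if len(groups) == 2 else ", and "
--     return ", ".join(groups[:-1]) + sep + groups[-1]
-- ===== Notes on version B (the rewrite author's own statement) =====
-- stated objective: alternative
-- what changed: Replaced A's three staged passes over the tokens (last-noun index scan, truncation slice, accumulator grouping loop with a leftover-merge branch) by a recursive splitter that peels off the segment up to the FIRST clothing noun and recurses on the rest (no-noun remainders vanish by construction), plus a unified separator-selection join instead of the three-way return chain.
import Mathlib
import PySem

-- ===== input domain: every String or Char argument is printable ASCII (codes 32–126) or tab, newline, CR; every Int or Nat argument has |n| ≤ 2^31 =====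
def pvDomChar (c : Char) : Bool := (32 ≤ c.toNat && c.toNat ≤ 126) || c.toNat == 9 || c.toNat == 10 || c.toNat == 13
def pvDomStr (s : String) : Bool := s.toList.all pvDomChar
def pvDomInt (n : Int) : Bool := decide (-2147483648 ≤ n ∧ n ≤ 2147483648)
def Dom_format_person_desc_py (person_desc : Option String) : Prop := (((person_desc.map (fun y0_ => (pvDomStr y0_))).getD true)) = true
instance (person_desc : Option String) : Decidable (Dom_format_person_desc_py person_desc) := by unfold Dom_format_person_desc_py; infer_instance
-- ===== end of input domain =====

-- B replaces A's staged last-noun scan + truncation + accumulator grouping loop by a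
-- recursive splitter at the FIRST clothing noun, and the three-way join by separator
-- selection (objective: alternative decomposition, same cost).

-- ===== PORT A =====
-- helpers shared by both ports: textually identical in Source A and Source B
-- (module-level 'lc', '_CLOTHING_NOUNS' and the three prefix-stripping loops).
def clothingNouns : PySem.Set String := PySem.Set.ofList
  ["shirt", "tshirt", "t-shirt", "sweater", "hoodie", "jacket", "coat", "vest",
   "pants", "jeans", "shorts", "skirt", "dress", "leggings",
   "shoes", "sneakers", "sandals", "slippers", "boots", "flip-flops",
   "hat", "cap", "beanie", "glasses", "sunglasses", "scarf", "tie",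
   "backpack", "bag", "purse", "apron"]

def lcPy (s : Option String) : String :=
  match s with
  | none => ""
  | some t => PySem.Str.lower (PySem.Str.strip t)

-- for prefix in ps: if s.startswith(prefix): s = s[len(prefix):].strip()
def stripStage (s : String) (ps : List String) : String :=
  ps.foldl (fun s p =>
    if PySem.Str.startswith s p
    then PySem.Str.strip (PySem.Str.slice s (some (PySem.Str.len p : Int)) none)
    else s) s

-- body of A's grouping loop:
-- cur.append(t); if t in _CLOTHING_NOUNS: groups.append(" ".join(cur)); cur = []
def pvGroupStep (acc : List String × List String) (t : String) : List String × List String :=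
  let cur := acc.2 ++ [t]
  if PySem.Set.contains clothingNouns t then (acc.1 ++ [PySem.Str.join " " cur], []) else (acc.1, cur)

-- A's final 1/2/else return chain
def pvOxford (groups : List String) : String :=
  if groups.length = 1 then PySem.List.pyGetD groups 0 ""
  else if groups.length = 2 then
    PySem.Str.join " and " [PySem.List.pyGetD groups 0 "", PySem.List.pyGetD groups 1 ""]
  else
    PySem.Str.join "" [PySem.Str.join ", " (PySem.List.slice groups none (some (-1))),
                       ", and ", PySem.List.pyGetD groups (-1) ""]

def format_person_desc_py (person_desc : Option String) : String :=
  let s := lcPy person_desc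
  if s = "" then "person" else
  let s := stripStage s ["a ", "the "]
  let s := stripStage s ["person ", "man ", "woman ", "boy ", "girl "]
  let s := stripStage s ["wearing ", "with "]
  let tokens := PySem.Str.split₀ s
  let lastIdx : Int := (PySem.List.enumerate tokens).foldl
      (fun acc it => if PySem.Set.contains clothingNouns it.2 then it.1 else acc) (-1)
  let tokens := if 0 ≤ lastIdx then PySem.List.slice tokens none (some (lastIdx + 1)) else tokens
  let gc := tokens.foldl pvGroupStep ([], [])
  let groups :=
    if gc.2.isEmpty then gc.1
    else if gc.1.isEmpty then [PySem.Str.join " " gc.2]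
    else gc.1.dropLast ++
      [PySem.Str.join " " [PySem.List.pyGetD gc.1 (-1) "", PySem.Str.join " " gc.2]]
  pvOxford groups

-- ===== PORT B =====
-- the 'for i, t in enumerate(tokens): if t in _CLOTHING_NOUNS: return …' scan of Source B's
-- _group_at_nouns: index of the first clothing noun, if any
def bFirstNoun : List String → Option Nat
  | [] => none
  | t :: ts => if PySem.Set.contains clothingNouns t then some 0 else (bFirstNoun ts).map (· + 1)

theorem bFirstNoun_lt (ts : List String) (i : Nat) (h : bFirstNoun ts = some i) :
    i < ts.length := by
  induction ts generalizing i with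
  | nil => simp [bFirstNoun] at h
  | cons t ts ih =>
    simp only [bFirstNoun] at h
    by_cases hc : PySem.Set.contains clothingNouns t = true
    · rw [if_pos hc] at h
      injection h with h
      subst h
      simp only [List.length_cons]
      omega
    · rw [if_neg hc] at h
      cases hr : bFirstNoun ts with
      | none => rw [hr] at h; simp at h
      | some j =>
        rw [hr, Option.map_some] at h
        injection h with h
        subst h
        have := ih j hr
        simp only [List.length_cons]
        omega

-- Source B's _group_at_nouns: peel off the segment up to the first noun, recurse on the rest
def bGroups (tokens : List String) : List String :=
  match h : bFirstNoun tokens with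
  | none => []
  | some i =>
      PySem.Str.join " " (PySem.List.slice tokens none (some ((i : Int) + 1))) ::
        bGroups (PySem.List.slice tokens (some ((i : Int) + 1)) none)
termination_by tokens.length
decreasing_by
  have hi := bFirstNoun_lt tokens i h
  have : (i : Int) + 1 = ((i + 1 : Nat) : Int) := by push_cast; ring
  rw [this, PySem.List.slice_from_natCast]
  simp
  omega

def format_person_desc_py_alt (person_desc : Option String) : String :=
  let s := lcPy person_desc
  if s = "" then "person" else
  let s := stripStage s ["a ", "the "]
  let s := stripStage s ["person ", "man ", "woman ", "boy ", "girl "]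
  let s := stripStage s ["wearing ", "with "]
  let tokens := PySem.Str.split₀ s
  let g := bGroups tokens
  let groups := if g.isEmpty then [PySem.Str.join " " tokens] else g
  if groups.length = 1 then PySem.List.pyGetD groups 0 ""
  else
    let sep := if groups.length = 2 then " and " else ", and "
    PySem.Str.join "" [PySem.Str.join ", " (PySem.List.slice groups none (some (-1))),
                       sep, PySem.List.pyGetD groups (-1) ""]

-- ===== PRECONDITION & SPEC =====
def Spec_format_person_desc_py (person_desc : Option String) (out : String) : Prop := out = format_person_desc_py_alt person_desc
instance (person_desc : Option String) (out : String) : Decidable (Spec_format_person_desc_py person_desc out) := by unfold Spec_format_person_desc_py; infer_instance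

-- ===== CLAIM (what is proved, stated in full; the proofs are below) =====
def Claim_equal_format_person_desc_py : Prop := ∀ (person_desc : Option String), Dom_format_person_desc_py person_desc → Spec_format_person_desc_py person_desc (format_person_desc_py person_desc)

-- ===== LEMMAS AND PROOFS =====

theorem head?_dropWhile_nonspace (p : Char → Bool) (l : List Char) (c : Char)
    (h : (l.dropWhile p).head? = some c) : p c = false := by
  induction l with
  | nil => simp at h
  | cons x xs ih =>
    rw [List.dropWhile_cons] at h
    by_cases hx : p x
    · rw [if_pos hx] at h; exact ih h
    · rw [if_neg hx] at h; simp at h; subst h; simpa using hx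

theorem getLast?_dropWhile (p : Char → Bool) (l : List Char)
    (h : l.dropWhile p ≠ []) : (l.dropWhile p).getLast? = l.getLast? := by
  obtain ⟨t, ht⟩ := List.dropWhile_suffix (l := l) p
  conv_rhs => rw [← ht]
  exact (List.getLast?_append_of_ne_nil _ h).symm

theorem getLast?_rstrip (l : List Char) (c : Char)
    (h : (PySem.Chars.rstrip l).getLast? = some c) : PySem.Chars.isspace c = false := by
  unfold PySem.Chars.rstrip at h
  rw [List.getLast?_reverse] at h
  exact head?_dropWhile_nonspace _ _ _ h

theorem head?_rstrip (l : List Char) (c : Char)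
    (h : (PySem.Chars.rstrip l).head? = some c) : l.head? = some c := by
  unfold PySem.Chars.rstrip at h
  obtain ⟨t, ht⟩ := List.dropWhile_suffix (l := l.reverse) PySem.Chars.isspace
  have hl : l = (List.dropWhile PySem.Chars.isspace l.reverse).reverse ++ t.reverse := by
    have := congrArg List.reverse ht
    simpa using this.symm
  cases hr : (List.dropWhile PySem.Chars.isspace l.reverse).reverse with
  | nil => rw [hr] at h; simp at h
  | cons a as =>
    rw [hr] at h hl
    simp at h
    subst h
    rw [hl]
    rfl

def Stripped (cs : List Char) : Prop :=
  (∀ c, cs.head? = some c → PySem.Chars.isspace c = false) ∧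
  (∀ c, cs.getLast? = some c → PySem.Chars.isspace c = false)

theorem stripped_strip (cs : List Char) : Stripped (PySem.Chars.strip cs) := by
  unfold PySem.Chars.strip
  constructor
  · intro c hc
    have := head?_rstrip _ _ hc
    exact head?_dropWhile_nonspace _ _ _ (by simpa [PySem.Chars.lstrip] using this)
  · intro c hc
    exact getLast?_rstrip _ _ hc

theorem isspace_lowerChar (c : Char) :
    PySem.Chars.isspace (PySem.Chars.lowerChar c) = PySem.Chars.isspace c := by
  unfold PySem.Chars.lowerChar
  by_cases hu : PySem.Chars.isupper c = true
  · rw [if_pos hu]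
    unfold PySem.Chars.isupper at hu
    simp only [Bool.and_eq_true, decide_eq_true_eq, Char.le_def] at hu
    have h1 : 65 ≤ c.toNat ∧ c.toNat ≤ 90 :=
      ⟨UInt32.le_iff_toNat_le.mp hu.1, UInt32.le_iff_toNat_le.mp hu.2⟩
    have hv : (c.toNat + 32).isValidChar := Or.inl (by omega)
    have ht : (Char.ofNat (c.toNat + 32)).toNat = c.toNat + 32 := by
      rw [Char.toNat_ofNat, if_pos hv]
    have e1 : PySem.Chars.isspace (Char.ofNat (c.toNat + 32)) = false := by
      rw [Bool.eq_false_iff]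
      intro hsp
      unfold PySem.Chars.isspace at hsp
      simp only [Bool.or_eq_true, Bool.and_eq_true, decide_eq_true_eq, ht] at hsp
      omega
    have e2 : PySem.Chars.isspace c = false := by
      rw [Bool.eq_false_iff]
      intro hsp
      unfold PySem.Chars.isspace at hsp
      simp only [Bool.or_eq_true, Bool.and_eq_true, decide_eq_true_eq] at hsp
      omega
    rw [e1, e2]
  · rw [if_neg hu]

theorem stripped_lower (cs : List Char) (h : Stripped cs) : Stripped (PySem.Chars.lower cs) := by
  unfold PySem.Chars.lower
  constructor
  · intro c hc
    rw [List.head?_map] at hc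
    cases hh : cs.head? with
    | none => rw [hh] at hc; simp at hc
    | some a =>
      rw [hh] at hc; simp at hc; subst hc
      rw [isspace_lowerChar]; exact h.1 a hh
  · intro c hc
    rw [List.getLast?_map] at hc
    cases hh : cs.getLast? with
    | none => rw [hh] at hc; simp at hc
    | some a =>
      rw [hh] at hc; simp at hc; subst hc
      rw [isspace_lowerChar]; exact h.2 a hh

theorem strip_ne_nil (xs : List Char) (c : Char)
    (hl : xs.getLast? = some c) (hc : PySem.Chars.isspace c = false) :
    PySem.Chars.strip xs ≠ [] := by
  unfold PySem.Chars.strip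
  have hx : xs ≠ [] := by intro h; rw [h] at hl; simp at hl
  have hlne : PySem.Chars.lstrip xs ≠ [] := by
    unfold PySem.Chars.lstrip
    rw [Ne, List.dropWhile_eq_nil_iff]
    intro hall
    have := hall c (List.mem_of_getLast? hl)
    rw [hc] at this; exact Bool.false_ne_true this
  have hll : (PySem.Chars.lstrip xs).getLast? = some c := by
    unfold PySem.Chars.lstrip
    rw [getLast?_dropWhile _ _ hlne, hl]
  unfold PySem.Chars.rstrip
  intro hcon
  have := congrArg List.length hcon
  simp at this
  have := this c (List.mem_of_getLast? hll)
  rw [hc] at this; exact Bool.false_ne_true this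

theorem split₀go_ne_nil (s : List Char) (cur : List Char) (acc : List (List Char))
    (h : cur ≠ [] ∨ acc ≠ []) : PySem.Chars.split₀.go s cur acc ≠ [] := by
  induction s generalizing cur acc with
  | nil =>
    unfold PySem.Chars.split₀.go
    rcases h with h | h
    · rw [if_neg (by simpa [List.isEmpty_iff] using h)]
      simp
    · by_cases hc : cur.isEmpty
      · rw [if_pos hc]; simpa using h
      · rw [if_neg hc]; simp
  | cons c rest ih =>
    unfold PySem.Chars.split₀.go
    by_cases hsp : PySem.Chars.isspace c = true
    · rw [if_pos hsp]
      by_cases hc : cur.isEmpty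
      · rw [if_pos hc]
        apply ih
        right
        rcases h with h | h
        · exact absurd (List.isEmpty_iff.mp hc) h
        · exact h
      · rw [if_neg hc]
        apply ih
        right
        simp
    · rw [if_neg hsp]
      apply ih
      left
      simp

theorem split₀_ne_nil (cs : List Char) (c : Char)
    (hh : cs.head? = some c) (hc : PySem.Chars.isspace c = false) :
    PySem.Chars.split₀ cs ≠ [] := by
  cases cs with
  | nil => simp at hh
  | cons a rest =>
    simp at hh; subst hh
    unfold PySem.Chars.split₀
    unfold PySem.Chars.split₀.go
    rw [if_neg (by simp [hc])]
    exact split₀go_ne_nil rest [a] [] (Or.inl (by simp))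

theorem stripStep_ok (s p : String) (hs : Stripped s.toList) (hne : s.toList ≠ [])
    (hp : p.toList.getLast? = some ' ') :
    Stripped (if PySem.Str.startswith s p
      then PySem.Str.strip (PySem.Str.slice s (some (PySem.Str.len p)) none) else s).toList ∧
    (if PySem.Str.startswith s p
      then PySem.Str.strip (PySem.Str.slice s (some (PySem.Str.len p)) none) else s).toList ≠ [] := by
  by_cases hsw : PySem.Str.startswith s p = true
  · rw [if_pos hsw]
    have hpre : p.toList <+: s.toList := by
      have : PySem.Chars.startswith s.toList p.toList = true := hsw
      exact (PySem.Chars.startswith_iff _ _).mp this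
    obtain ⟨rest, hrest⟩ := hpre
    have hrne : rest ≠ [] := by
      intro h0
      rw [h0, List.append_nil] at hrest
      have : s.toList.getLast? = some ' ' := by rw [← hrest]; exact hp
      have hf := hs.2 ' ' this
      have ht : PySem.Chars.isspace ' ' = true := by decide
      rw [hf] at ht
      exact Bool.false_ne_true ht
    obtain ⟨c, hgl⟩ : ∃ c, rest.getLast? = some c := by
      cases h : rest.getLast? with
      | none => exact absurd (List.getLast?_eq_none_iff.mp h) hrne
      | some a => exact ⟨a, rfl⟩
    have hgls : s.toList.getLast? = some c := by
      rw [← hrest, List.getLast?_append_of_ne_nil _ hrne, hgl]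
    have hcns : PySem.Chars.isspace c = false := hs.2 c hgls
    have hslice : (PySem.Str.slice s (some (PySem.Str.len p)) none).toList = rest := by
      rw [PySem.Str.toList_slice, PySem.Chars.slice_eq_listSlice,
          PySem.List.slice_from _ (by simp [PySem.Str.len])]
      have : (PySem.Str.len p).toNat = p.toList.length := by
        simp [PySem.Str.len]
      rw [this, ← hrest, List.drop_left]
    rw [PySem.Str.toList_strip, hslice]
    exact ⟨stripped_strip rest, strip_ne_nil rest c hgl hcns⟩
  · rw [if_neg hsw]
    exact ⟨hs, hne⟩

theorem stripStage_ok (ps : List String) (s : String) (hs : Stripped s.toList) (hne : s.toList ≠ [])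
    (hp : ∀ p ∈ ps, p.toList.getLast? = some ' ') :
    Stripped (stripStage s ps).toList ∧ (stripStage s ps).toList ≠ [] := by
  induction ps generalizing s with
  | nil => exact ⟨hs, hne⟩
  | cons p ps ih =>
    unfold stripStage
    rw [List.foldl_cons]
    have hstep := stripStep_ok s p hs hne (hp p (by simp))
    exact ih _ hstep.1 hstep.2 (fun q hq => hp q (by simp [hq]))

theorem foldl_group_nounfree (ts : List String) (gs cs : List String)
    (h : ∀ t ∈ ts, PySem.Set.contains clothingNouns t = false) :
    ts.foldl pvGroupStep (gs, cs) = (gs, cs ++ ts) := by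
  induction ts generalizing cs with
  | nil => simp
  | cons t ts ih =>
    have ht := h t (by simp)
    simp only [List.foldl_cons, pvGroupStep, ht, if_false, Bool.false_eq_true]
    rw [ih (cs ++ [t]) (fun x hx => h x (by simp [hx]))]
    simp

theorem foldl_enum_nounfree (ts : List String) (a : Int) (st : Int)
    (h : ∀ t ∈ ts, PySem.Set.contains clothingNouns t = false) :
    (PySem.List.enumerate ts st).foldl
      (fun acc it => if PySem.Set.contains clothingNouns it.2 then it.1 else acc) a = a := by
  induction ts generalizing st with
  | nil => simp [PySem.List.enumerate]
  | cons t ts ih =>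
    rw [PySem.List.enumerate_cons]
    simp only [List.foldl_cons, h t (by simp), Bool.false_eq_true]
    exact ih (st+1) (fun x hx => h x (by simp [hx]))

theorem noun_decomp (ts : List String) (h : ∃ t ∈ ts, PySem.Set.contains clothingNouns t = true) :
    ∃ pre n suf, ts = pre ++ n :: suf ∧ PySem.Set.contains clothingNouns n = true ∧
      ∀ t ∈ suf, PySem.Set.contains clothingNouns t = false := by
  induction ts using List.reverseRecOn with
  | nil => simp at h
  | append_singleton xs x ih =>
    by_cases hx : PySem.Set.contains clothingNouns x = true
    · exact ⟨xs, x, [], by simp, hx, by simp⟩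
    · obtain ⟨t, ht, htn⟩ := h
      rcases List.mem_append.1 ht with h1 | h2
      · obtain ⟨pre, n, suf, heq, hn, hsuf⟩ := ih ⟨t, h1, htn⟩
        refine ⟨pre, n, suf ++ [x], by simp [heq], hn, ?_⟩
        intro u hu
        rcases List.mem_append.1 hu with h3 | h4
        · exact hsuf u h3
        · simp at h4; subst h4; simpa using hx
      · simp at h2; subst h2; exact absurd htn hx

theorem lastIdx_eq (pre : List String) (n : String) (suf : List String)
    (hn : PySem.Set.contains clothingNouns n = true)
    (hsuf : ∀ t ∈ suf, PySem.Set.contains clothingNouns t = false) :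
    (PySem.List.enumerate (pre ++ n :: suf)).foldl
      (fun acc it => if PySem.Set.contains clothingNouns it.2 then it.1 else acc) (-1) =
      (pre.length : Int) := by
  have : (pre ++ n :: suf) = (pre ++ [n]) ++ suf := by simp
  rw [this, PySem.List.enumerate_append, List.foldl_append,
      PySem.List.enumerate_append, List.foldl_append]
  rw [foldl_enum_nounfree suf _ _ hsuf]
  have h1 : PySem.List.enumerate ([n] : List String) ((0:Int) + pre.length) = [((pre.length : Int), n)] := by
    rw [PySem.List.enumerate_cons]; simp [PySem.List.enumerate]
  rw [h1]
  have hn' : n ∈ clothingNouns := by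
    have := (PySem.Set.contains_iff clothingNouns n).mp hn
    exact this
  simp [hn']

theorem bFirstNoun_nounfree (cs : List String)
    (h : ∀ t ∈ cs, PySem.Set.contains clothingNouns t = false) :
    bFirstNoun cs = none := by
  induction cs with
  | nil => rfl
  | cons c cs ih =>
    simp only [bFirstNoun]
    rw [if_neg (by rw [h c (by simp)]; decide), ih (fun x hx => h x (by simp [hx]))]
    rfl

theorem bFirstNoun_append (cs : List String) (n : String) (ts : List String)
    (hcs : ∀ t ∈ cs, PySem.Set.contains clothingNouns t = false)
    (hn : PySem.Set.contains clothingNouns n = true) :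
    bFirstNoun (cs ++ n :: ts) = some cs.length := by
  induction cs with
  | nil =>
    simp only [List.nil_append, bFirstNoun]
    rw [if_pos hn]
    rfl
  | cons c cs ih =>
    rw [List.cons_append]
    simp only [bFirstNoun]
    rw [if_neg (by rw [hcs c (by simp)]; decide)]
    rw [ih (fun x hx => hcs x (by simp [hx]))]
    rfl

theorem bFirstNoun_ne_none (ts : List String) (t : String) (ht : t ∈ ts)
    (hn : PySem.Set.contains clothingNouns t = true) : bFirstNoun ts ≠ none := by
  induction ts with
  | nil => simp at ht
  | cons c cs ih =>
    simp only [bFirstNoun]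
    by_cases hc : PySem.Set.contains clothingNouns c = true
    · rw [if_pos hc]; simp
    · rw [if_neg hc]
      rcases List.mem_cons.1 ht with h1 | h2
      · subst h1; exact absurd hn hc
      · cases hr : bFirstNoun cs with
        | none => exact absurd hr (ih h2)
        | some j => simp

theorem bGroups_ne_nil (ts : List String) (h : bFirstNoun ts ≠ none) : bGroups ts ≠ [] := by
  unfold bGroups
  split
  · next hh => exact absurd hh h
  · simp

theorem bGroups_eq_some (ts : List String) (i : Nat) (h : bFirstNoun ts = some i) :
    bGroups ts = PySem.Str.join " " (PySem.List.slice ts none (some ((i : Int) + 1))) ::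
      bGroups (PySem.List.slice ts (some ((i : Int) + 1)) none) := by
  conv_lhs => rw [bGroups.eq_def]
  split
  · next hh => rw [h] at hh; cases hh
  · next j hj =>
    rw [h] at hj
    injection hj with hj
    subst hj
    rfl

theorem bGroups_nounfree (cs : List String)
    (h : ∀ t ∈ cs, PySem.Set.contains clothingNouns t = false) :
    bGroups cs = [] := by
  unfold bGroups
  split
  · rfl
  · next i hi =>
    rw [bFirstNoun_nounfree cs h] at hi
    exact absurd hi (by simp)

-- Source B's recursive splitter computes exactly the first component of A's grouping fold
def gAux (cs : List String) : List String → List String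
  | [] => []
  | t :: ts =>
      if PySem.Set.contains clothingNouns t
      then PySem.Str.join " " (cs ++ [t]) :: gAux [] ts
      else gAux (cs ++ [t]) ts

theorem foldl_fst_eq_gAux (ts : List String) (gs cs : List String) :
    (ts.foldl pvGroupStep (gs, cs)).1 = gs ++ gAux cs ts := by
  induction ts generalizing gs cs with
  | nil => simp [gAux]
  | cons t ts ih =>
    by_cases hc : PySem.Set.contains clothingNouns t = true
    · simp only [List.foldl_cons, pvGroupStep, hc, if_true, gAux]
      rw [ih]
      simp
    · simp only [List.foldl_cons, pvGroupStep, hc, if_false, Bool.false_eq_true, gAux]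
      rw [ih]

theorem gAux_eq_bGroups (ts : List String) (cs : List String)
    (hcs : ∀ t ∈ cs, PySem.Set.contains clothingNouns t = false) :
    gAux cs ts = bGroups (cs ++ ts) := by
  induction ts generalizing cs with
  | nil =>
    rw [List.append_nil, bGroups_nounfree cs hcs]
    rfl
  | cons t ts ih =>
    by_cases hc : PySem.Set.contains clothingNouns t = true
    · have hfn := bFirstNoun_append cs t ts hcs hc
      rw [bGroups_eq_some _ _ hfn]
      have hcast : ((cs.length : Nat) : Int) + 1 = ((cs.length + 1 : Nat) : Int) := by push_cast; ring
      rw [hcast, PySem.List.slice_to_natCast, PySem.List.slice_from_natCast]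
      have htake : (cs ++ t :: ts).take (cs.length + 1) = cs ++ [t] := by
        rw [show cs ++ t :: ts = (cs ++ [t]) ++ ts by simp,
            List.take_append_of_le_length (by simp)]
        simp
      have hdrop : (cs ++ t :: ts).drop (cs.length + 1) = ts := by
        rw [show cs ++ t :: ts = (cs ++ [t]) ++ ts by simp,
            List.drop_append_of_le_length (by simp)]
        simp
      rw [htake, hdrop, gAux]
      rw [if_pos hc]
      rw [ih [] (by simp)]
      simp
    · rw [gAux, if_neg hc]
      rw [ih (cs ++ [t]) ?_]
      · simp
      · intro x hx
        rcases List.mem_append.1 hx with h1 | h2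
        · exact hcs x h1
        · simp at h2; subst h2; simpa using hc

-- A's truncate-and-group value equals B's groups value, for nonempty token lists
theorem groups_eq (tokens : List String) (hne : tokens ≠ []) :
    (let lastIdx : Int := (PySem.List.enumerate tokens).foldl
        (fun acc it => if PySem.Set.contains clothingNouns it.2 then it.1 else acc) (-1)
     let tokens' := if 0 ≤ lastIdx then PySem.List.slice tokens none (some (lastIdx + 1)) else tokens
     let gc := tokens'.foldl pvGroupStep ([], [])
     if gc.2.isEmpty then gc.1
     else if gc.1.isEmpty then [PySem.Str.join " " gc.2]
     else gc.1.dropLast ++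
       [PySem.Str.join " " [PySem.List.pyGetD gc.1 (-1) "", PySem.Str.join " " gc.2]]) =
    (let g := bGroups tokens
     if g.isEmpty then [PySem.Str.join " " tokens] else g) := by
  by_cases hex : ∃ t ∈ tokens, PySem.Set.contains clothingNouns t = true
  · obtain ⟨pre, n, suf, heq, hn, hsuf⟩ := noun_decomp tokens hex
    subst heq
    have hli := lastIdx_eq pre n suf hn hsuf
    rw [hli]
    dsimp only
    have hslice : PySem.List.slice (pre ++ n :: suf) none (some ((pre.length : Int) + 1)) =
        pre ++ [n] := by
      have : (pre.length : Int) + 1 = ((pre.length + 1 : Nat) : Int) := by push_cast; ring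
      rw [this, PySem.List.slice_to_natCast]
      simp [List.take_append]
    have hn' : n ∈ clothingNouns := (PySem.Set.contains_iff clothingNouns n).mp hn
    rw [if_pos (Int.natCast_nonneg pre.length), hslice]
    -- truncated fold ends with empty cur, so A's groups = its first component
    have hfold : List.foldl pvGroupStep ([], []) (pre ++ [n]) =
        ((List.foldl pvGroupStep ([], []) pre).1 ++
           [PySem.Str.join " " ((List.foldl pvGroupStep ([], []) pre).2 ++ [n])], []) := by
      rw [List.foldl_append]
      simp [pvGroupStep, hn']
    rw [hfold]
    simp only [List.isEmpty_nil, if_true]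
    -- that first component is gAux [] (pre ++ [n]) = bGroups (pre ++ [n]) … but we need
    -- bGroups of the FULL list; the noun-free suffix contributes nothing to either
    have hA : (List.foldl pvGroupStep ([], []) pre).1 ++
        [PySem.Str.join " " ((List.foldl pvGroupStep ([], []) pre).2 ++ [n])] =
        (List.foldl pvGroupStep ([], []) (pre ++ n :: suf)).1 := by
      rw [show pre ++ n :: suf = (pre ++ [n]) ++ suf by simp, List.foldl_append, hfold,
          foldl_group_nounfree suf _ _ hsuf]
    rw [hA, foldl_fst_eq_gAux, List.nil_append, gAux_eq_bGroups _ [] (by simp),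
        List.nil_append]
    have hfn : bFirstNoun (pre ++ n :: suf) ≠ none :=
      bFirstNoun_ne_none _ n (by simp) hn
    have hgne : bGroups (pre ++ n :: suf) ≠ [] := bGroups_ne_nil _ hfn
    rw [if_neg (by simpa [List.isEmpty_iff] using hgne)]
  · have hall : ∀ t ∈ tokens, PySem.Set.contains clothingNouns t = false := by
      intro t ht
      cases h : PySem.Set.contains clothingNouns t
      · rfl
      · exact absurd ⟨t, ht, h⟩ hex
    rw [foldl_enum_nounfree tokens _ _ hall]
    dsimp only
    rw [if_neg (show ¬ ((0:Int) ≤ -1) by decide)]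
    rw [foldl_group_nounfree tokens [] [] hall]
    simp only
    rw [bGroups_nounfree tokens hall]
    simp [List.isEmpty_iff, hne]

-- B's separator-selection join equals A's three-way return chain
theorem oxford_eq (g : List String) :
    (if g.length = 1 then PySem.List.pyGetD g 0 ""
     else
       PySem.Str.join "" [PySem.Str.join ", " (PySem.List.slice g none (some (-1))),
         (if g.length = 2 then " and " else ", and "), PySem.List.pyGetD g (-1) ""]) =
    pvOxford g := by
  unfold pvOxford
  by_cases h1 : g.length = 1
  · rw [if_pos h1, if_pos h1]
  · rw [if_neg h1, if_neg h1]
    by_cases h2 : g.length = 2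
    · rw [if_pos h2, if_pos h2]
      obtain ⟨a, b, rfl⟩ : ∃ a b, g = [a, b] := by
        match g, h2 with
        | [a, b], _ => exact ⟨a, b, rfl⟩
      rw [PySem.List.slice_to_neg_one,
          PySem.List.pyGetD_neg_one (xs := [a, b]) (d := "") (by simp)]
      simp [PySem.List.pyGetD, PySem.List.pyGet?, PySem.List.pyIdx?, PySem.Str.join, PySem.Chars.join, List.intercalate]
    · rw [if_neg h2, if_neg h2]

-- ===== VERDICT (by name: the statement is the Claim_ definition above) =====
theorem format_person_desc_py_spec : Claim_equal_format_person_desc_py := by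
  intro pd _hdom
  unfold Spec_format_person_desc_py
  have hstr : Stripped (lcPy pd).toList := by
    cases pd with
    | none =>
      constructor <;> intro c hc <;> simp [lcPy] at hc
    | some t =>
      show Stripped (PySem.Str.lower (PySem.Str.strip t)).toList
      rw [PySem.Str.toList_lower, PySem.Str.toList_strip]
      exact stripped_lower _ (stripped_strip _)
  unfold format_person_desc_py format_person_desc_py_alt
  dsimp only
  by_cases h0 : lcPy pd = ""
  · rw [if_pos h0, if_pos h0]
  · rw [if_neg h0, if_neg h0]
    have hne0 : (lcPy pd).toList ≠ [] := fun h => h0 (String.toList_eq_nil_iff.mp h)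
    have h1 := stripStage_ok ["a ", "the "] (lcPy pd) hstr hne0 (by decide)
    have h2 := stripStage_ok ["person ", "man ", "woman ", "boy ", "girl "] _ h1.1 h1.2 (by decide)
    have h3 := stripStage_ok ["wearing ", "with "] _ h2.1 h2.2 (by decide)
    have htok : PySem.Str.split₀ (stripStage (stripStage (stripStage (lcPy pd) ["a ", "the "])
        ["person ", "man ", "woman ", "boy ", "girl "]) ["wearing ", "with "]) ≠ [] := by
      set s3 := stripStage (stripStage (stripStage (lcPy pd) ["a ", "the "])
        ["person ", "man ", "woman ", "boy ", "girl "]) ["wearing ", "with "] with hs3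
      cases hl : s3.toList with
      | nil => exact absurd hl h3.2
      | cons a r =>
        have hhd : s3.toList.head? = some a := by rw [hl]; rfl
        have hans : PySem.Chars.isspace a = false := h3.1.1 a hhd
        have hinner : PySem.Chars.split₀ s3.toList ≠ [] := split₀_ne_nil s3.toList a hhd hans
        unfold PySem.Str.split₀
        simpa using hinner
    rw [groups_eq _ htok, oxford_eq]
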